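-- pv_equiv track=rewrite | github.com/KDMG/Iterated_Local_Search_metaheuristic | instantgraph.py | ExtractInstanceGraph
-- ===== SOURCE A (Python) =====
-- def ExtractInstanceGraph(trace, cr, alignment=False):
--     V = []
--     W = []
--     id = 0
--     for event in trace:
--         if alignment:
--             V.append((id, event))
--         else:
--             V.append((id, event.get("concept:name")))
--         id += 1
--     for i in range(len(V)):
--         for k in range(i, len(V)):
--             e1 = V[i]
--             e2 = V[k]
--             if e1[0] == e2[0]:
--                 continue
--             if (e1[1], e2[1]) in cr:
--                 flag_e1 = True
--                 for s in range(i + 1, k):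
--                     e3 = V[s]
--                     if (e1[1], e3[1]) in cr:
--                         flag_e1 = False
--                 flag_e2 = True
--                 for s in range(i + 1, k):
--                     e3 = V[s]
--                     if (e3[1], e2[1]) in cr:
--                         flag_e2 = False
--
--                 if flag_e1 or flag_e2:
--                     W.append((e1, e2))
--     return V, W
-- ===== SOURCE B (Python) =====
-- def ExtractInstanceGraph(trace, cr, alignment=False):
--     if alignment:
--         V = list(enumerate(trace))
--     else:
--         V = [(i, e.get("concept:name")) for i, e in enumerate(trace)]
--     crset = set(cr)
--     W = []
--     for idx in range(len(V)):
--         e1 = V[idx]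
--         blocked = False          # some earlier successor of e1 already seen
--         seen = set()             # labels strictly between e1 and the current event
--         for e2 in V[idx + 1:]:
--             hit = (e1[1], e2[1]) in crset
--             if hit and (not blocked or all((x, e2[1]) not in crset for x in seen)):
--                 W.append((e1, e2))
--             blocked = blocked or hit
--             seen.add(e2[1])
--     return V, W
-- ===== Notes on version B (the rewrite author's own statement) =====
-- stated objective: alternative
-- what changed: Replaces A's per-pair recomputation of flag_e1/flag_e2 by two extra inner index scans with a single forward sweep per source event that maintains the two flags incrementally (a 'blocked' boolean and a set of the intermediate labels), with cr read through a set.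
-- outside the precondition, e.g. on ExtractInstanceGraph([{}], set(), False): A returns ([(0, None)], []), B returns ([(0, None)], []); on ExtractInstanceGraph([{}], set(), True): A returns ([(0, {})], []), B returns ([(0, {})], [])
import Mathlib
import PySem

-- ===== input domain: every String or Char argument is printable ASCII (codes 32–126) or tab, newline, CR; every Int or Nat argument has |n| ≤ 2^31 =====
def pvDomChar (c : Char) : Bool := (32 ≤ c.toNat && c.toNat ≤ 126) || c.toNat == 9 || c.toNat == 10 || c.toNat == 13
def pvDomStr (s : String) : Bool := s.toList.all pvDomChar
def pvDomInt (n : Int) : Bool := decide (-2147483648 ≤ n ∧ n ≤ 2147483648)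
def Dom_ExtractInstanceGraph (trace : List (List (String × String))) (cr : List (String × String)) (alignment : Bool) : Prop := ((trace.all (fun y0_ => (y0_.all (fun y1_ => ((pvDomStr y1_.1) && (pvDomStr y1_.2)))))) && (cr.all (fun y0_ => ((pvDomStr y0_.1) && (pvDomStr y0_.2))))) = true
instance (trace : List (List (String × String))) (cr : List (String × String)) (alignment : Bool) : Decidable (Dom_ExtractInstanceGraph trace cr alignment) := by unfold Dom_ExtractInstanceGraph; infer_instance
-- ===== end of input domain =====

-- B replaces A's per-pair O(n) recomputation of flag_e1/flag_e2 with one forward sweep per source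
-- event that maintains them incrementally (a 'blocked' boolean plus a set of intermediate labels).

-- ===== PORT A =====
-- event.get("concept:name"): first-match assoc-list lookup (= Python dict.get on the dict's items).
-- Python returns None when the key is missing, and with alignment=True it puts the raw event dict
-- into V — neither is a value of the declared (Int × String) type; Pre_ excludes both inputs and
-- "" is a typed placeholder on them.
def pvEventLabel (alignment : Bool) (event : List (String × String)) : String :=
  if alignment then "" else ((event.find? (fun p => p.1 == "concept:name")).map Prod.snd).getD ""

def ExtractInstanceGraph (trace : List (List (String × String))) (cr : List (String × String)) (alignment : Bool) : (List (Int × String)) × (List ((Int × String) × (Int × String))) :=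
  let V : List (Int × String) :=
    (trace.foldl (fun (st : List (Int × String) × Int) event =>
      (st.1 ++ [(st.2, pvEventLabel alignment event)], st.2 + 1)) (([] : List (Int × String)), (0 : Int))).1
  let n : Int := V.length
  let W : List ((Int × String) × (Int × String)) :=
    (PySem.List.pyRange 0 n 1).foldl (fun W i =>
      (PySem.List.pyRange i n 1).foldl (fun W k =>
        let e1 := PySem.List.pyGetD V i ((0 : Int), "")
        let e2 := PySem.List.pyGetD V k ((0 : Int), "")
        if e1.1 = e2.1 then W
        else if (e1.2, e2.2) ∈ cr then
          let flag_e1 := (PySem.List.pyRange (i + 1) k 1).foldl (fun fl s =>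
              let e3 := PySem.List.pyGetD V s ((0 : Int), "")
              if (e1.2, e3.2) ∈ cr then false else fl) true
          let flag_e2 := (PySem.List.pyRange (i + 1) k 1).foldl (fun fl s =>
              let e3 := PySem.List.pyGetD V s ((0 : Int), "")
              if (e3.2, e2.2) ∈ cr then false else fl) true
          if flag_e1 || flag_e2 then W ++ [(e1, e2)] else W
        else W) W) []
  (V, W)

-- ===== PORT B =====
-- inner sweep: 'blocked' = a successor of e1 was already passed; 'seen' = set of labels strictly
-- between e1 and the current event.
def pvBInner (crset : PySem.Set (String × String)) (e1 : Int × String) :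
    List (Int × String) → Bool → PySem.Set String → List ((Int × String) × (Int × String))
  | [], _, _ => []
  | e2 :: rest, blocked, seen =>
      let hit := PySem.Set.contains crset (e1.2, e2.2)
      (if hit && (!blocked || seen.all (fun x => !(PySem.Set.contains crset (x, e2.2)))) then
        [(e1, e2)] else [])
        ++ pvBInner crset e1 rest (blocked || hit) (PySem.Set.add seen e2.2)

def pvBOuter (crset : PySem.Set (String × String)) :
    List (Int × String) → List ((Int × String) × (Int × String))
  | [] => []
  | e1 :: rest => pvBInner crset e1 rest false PySem.Set.empty ++ pvBOuter crset rest

def ExtractInstanceGraph_alt (trace : List (List (String × String))) (cr : List (String × String)) (alignment : Bool) : (List (Int × String)) × (List ((Int × String) × (Int × String))) :=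
  let V : List (Int × String) :=
    (PySem.List.enumerate trace).map (fun p => (p.1, pvEventLabel alignment p.2))
  (V, pvBOuter (PySem.Set.ofList cr) V)

-- ===== PRECONDITION & SPEC =====
-- Pre_ excludes alignment=True (A's V then holds the raw event dicts) and traces with an event
-- lacking the "concept:name" key (A then puts None into V): in both cases A returns a value that
-- is not of the declared (List (Int × String)) × … type.
def Pre_ExtractInstanceGraph (trace : List (List (String × String))) (cr : List (String × String)) (alignment : Bool) : Prop :=
  alignment = false ∧ ∀ event ∈ trace, "concept:name" ∈ event.map Prod.fst

instance (trace : List (List (String × String))) (cr : List (String × String)) (alignment : Bool) : Decidable (Pre_ExtractInstanceGraph trace cr alignment) := by unfold Pre_ExtractInstanceGraph; infer_instance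

def pvWitness_ExtractInstanceGraph : (List (List (String × String))) × (List (String × String)) × Bool :=
  ([[("concept:name", "a")], [("concept:name", "b")], [("concept:name", "c")]], [("a", "b"), ("b", "c")], false)

def Spec_ExtractInstanceGraph (trace : List (List (String × String))) (cr : List (String × String)) (alignment : Bool) (out : (List (Int × String)) × (List ((Int × String) × (Int × String)))) : Prop := out = ExtractInstanceGraph_alt trace cr alignment
instance (trace : List (List (String × String))) (cr : List (String × String)) (alignment : Bool) (out : (List (Int × String)) × (List ((Int × String) × (Int × String)))) : Decidable (Spec_ExtractInstanceGraph trace cr alignment out) := by unfold Spec_ExtractInstanceGraph; infer_instance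

-- ===== CLAIM (what is proved, stated in full; the proofs are below) =====
def Claim_equal_ExtractInstanceGraph : Prop := ∀ (trace : List (List (String × String))) (cr : List (String × String)) (alignment : Bool), Dom_ExtractInstanceGraph trace cr alignment → Pre_ExtractInstanceGraph trace cr alignment → Spec_ExtractInstanceGraph trace cr alignment (ExtractInstanceGraph trace cr alignment)

-- ===== LEMMAS AND PROOFS =====

-- the per-pair inclusion test, phrased over the list of intermediate events 'done'
def pvCond (cr : List (String × String)) (e1 : Int × String) (done : List (Int × String)) (e2 : Int × String) : Bool :=
  decide ((e1.2, e2.2) ∈ cr) &&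
    (done.all (fun e3 => !decide ((e1.2, e3.2) ∈ cr)) || done.all (fun e3 => !decide ((e3.2, e2.2) ∈ cr)))

-- common structural form of both inner loops
def pvSpecInner (cr : List (String × String)) (e1 : Int × String) :
    List (Int × String) → List (Int × String) → List ((Int × String) × (Int × String))
  | _, [] => []
  | done, e2 :: rest =>
      (if pvCond cr e1 done e2 then [(e1, e2)] else []) ++ pvSpecInner cr e1 (done ++ [e2]) rest

-- A's per-k body as a list-valued function (what each k appends)
def pvGA (cr : List (String × String)) (V : List (Int × String)) (i k : Int) : List ((Int × String) × (Int × String)) :=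
  let e1 := PySem.List.pyGetD V i ((0 : Int), "")
  let e2 := PySem.List.pyGetD V k ((0 : Int), "")
  if e1.1 = e2.1 then []
  else if (e1.2, e2.2) ∈ cr then
    let flag_e1 := (PySem.List.pyRange (i + 1) k 1).foldl (fun fl s =>
        let e3 := PySem.List.pyGetD V s ((0 : Int), "")
        if (e1.2, e3.2) ∈ cr then false else fl) true
    let flag_e2 := (PySem.List.pyRange (i + 1) k 1).foldl (fun fl s =>
        let e3 := PySem.List.pyGetD V s ((0 : Int), "")
        if (e3.2, e2.2) ∈ cr then false else fl) true
    if flag_e1 || flag_e2 then [(e1, e2)] else []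
  else []

-- generic: a foldl that only appends is a flatMap
theorem pvFoldlFlat {α β : Type} (l : List α) (g : α → List β) (f : List β → α → List β)
    (h : ∀ acc x, f acc x = acc ++ g x) : ∀ acc, l.foldl f acc = acc ++ l.flatMap g := by
  induction l with
  | nil => intro acc; simp
  | cons x xs ih => intro acc; simp [h, ih, List.flatMap_cons, List.append_assoc]

-- the flag loops compute an 'all' over the scanned range
theorem pvFlagFold (l : List Int) (c : Int → Prop) [DecidablePred c] : ∀ (b : Bool),
    l.foldl (fun fl s => if c s then false else fl) b = (b && l.all (fun s => !decide (c s))) := by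
  induction l with
  | nil => intro b; simp
  | cons x xs ih =>
      intro b
      rw [List.foldl_cons, ih]
      by_cases hc : c x <;> simp [hc]

-- A's V-building loop
theorem pvVfold (trace : List (List (String × String))) (f : List (String × String) → String) :
    ∀ (acc : List (Int × String)) (s : Int),
    (trace.foldl (fun (st : List (Int × String) × Int) event =>
      (st.1 ++ [(st.2, f event)], st.2 + 1)) (acc, s)).1
    = acc ++ (PySem.List.enumerate trace s).map (fun p => (p.1, f p.2)) := by
  induction trace with
  | nil => intro acc s; simp [PySem.List.enumerate]
  | cons e es ih =>
      intro acc s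
      simp [PySem.List.enumerate_cons, ih, List.append_assoc]

theorem pvSliceMap (V : List (Int × String)) (a b : Nat) (hab : a ≤ b) (hb : b ≤ V.length) :
    (PySem.List.pyRange (a : Int) (b : Int) 1).map (fun s => PySem.List.pyGetD V s ((0 : Int), ""))
      = (V.drop a).take (b - a) := by
  have hsplit : PySem.List.pyRange (a : Int) (V.length : Int) 1
      = PySem.List.pyRange (a : Int) (b : Int) 1 ++ PySem.List.pyRange (b : Int) (V.length : Int) 1 :=
    PySem.List.pyRange_one_append _ _ _ (by exact_mod_cast hab) (by exact_mod_cast hb)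
  have hA : (PySem.List.pyRange (a : Int) (V.length : Int) 1).map
      (fun s => PySem.List.pyGetD V s ((0 : Int), "")) = V.drop a := by
    have := PySem.List.map_pyGetD_pyRange (xs := V) (d := ((0 : Int), "")) (a := (a : Int))
      (by exact_mod_cast Int.natCast_nonneg a)
    simpa using this
  have hB : (PySem.List.pyRange (b : Int) (V.length : Int) 1).map
      (fun s => PySem.List.pyGetD V s ((0 : Int), "")) = V.drop b := by
    have := PySem.List.map_pyGetD_pyRange (xs := V) (d := ((0 : Int), "")) (a := (b : Int))
      (by exact_mod_cast Int.natCast_nonneg b)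
    simpa using this
  have hdec : V.drop a = (V.drop a).take (b - a) ++ V.drop b := by
    conv_lhs => rw [← List.take_append_drop (b - a) (V.drop a)]
    rw [List.drop_drop]
    have : a + (b - a) = b := by omega
    rw [this]
  rw [hsplit, List.map_append, hB] at hA
  rw [hdec] at hA
  exact List.append_cancel_right hA

-- B's inner loop computes pvSpecInner, given the state invariants
theorem pvInnerB (cr : List (String × String)) (e1 : Int × String) :
    ∀ (suf done : List (Int × String)) (blocked : Bool) (seen : PySem.Set String),
    blocked = done.any (fun e3 => decide ((e1.2, e3.2) ∈ cr)) →
    (∀ x, x ∈ seen ↔ x ∈ done.map Prod.snd) →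
    pvBInner (PySem.Set.ofList cr) e1 suf blocked seen = pvSpecInner cr e1 done suf := by
  intro suf
  induction suf with
  | nil => intro done blocked seen _ _; simp [pvBInner, pvSpecInner]
  | cons e2 rest ih =>
      intro done blocked seen hb hs
      have hcontains : ∀ p : String × String,
          PySem.Set.contains (PySem.Set.ofList cr) p = decide (p ∈ cr) := by
        intro p
        rw [Bool.eq_iff_iff]
        simp [PySem.Set.mem_ofList]
      have hflag1 : (!blocked) = done.all (fun e3 => !decide ((e1.2, e3.2) ∈ cr)) := by
        rw [Bool.eq_iff_iff]
        simp [hb, List.all_eq_true]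
      have hflag2 : (seen.all fun x => !decide ((x, e2.2) ∈ cr))
          = done.all (fun e3 => !decide ((e3.2, e2.2) ∈ cr)) := by
        rw [Bool.eq_iff_iff]
        simp only [List.all_eq_true, Bool.not_eq_eq_eq_not, Bool.not_true,
          decide_eq_false_iff_not]
        constructor
        · intro h e3 h3
          exact h e3.2 ((hs e3.2).mpr (List.mem_map_of_mem h3))
        · intro h x hx
          rcases List.mem_map.mp ((hs x).mp hx) with ⟨e3, h3, rfl⟩
          exact h e3 h3
      simp only [pvBInner, pvSpecInner, hcontains, hflag1, hflag2, pvCond]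
      congr 1
      exact ih (done ++ [e2]) (blocked || decide ((e1.2, e2.2) ∈ cr)) (PySem.Set.add seen e2.2)
        (by simp [hb, List.any_append])
        (by intro x; rw [PySem.Set.mem_add, hs x]; simp [List.map_append])

-- A's per-k body, for i < k, is the pvCond test over the scanned slice
theorem pvGAeq (cr : List (String × String)) (V : List (Int × String))
    (hid : ∀ (j : Nat) (h : j < V.length), (V[j]).1 = (j : Int)) (i m : Nat)
    (hi : i < V.length) (him : i + 1 ≤ m) (hm : m < V.length) :
    pvGA cr V (i : Int) (m : Int)
      = if pvCond cr V[i] ((V.drop (i + 1)).take (m - (i + 1))) V[m] then [(V[i], V[m])] else [] := by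
  have hgi : PySem.List.pyGetD V (i : Int) ((0 : Int), "") = V[i] := by
    rw [PySem.List.pyGetD_natCast]; exact List.getD_eq_getElem V _ hi
  have hgm : PySem.List.pyGetD V (m : Int) ((0 : Int), "") = V[m] := by
    rw [PySem.List.pyGetD_natCast]; exact List.getD_eq_getElem V _ hm
  have hne : ¬ ((V[i]).1 = (V[m]).1) := by
    rw [hid i hi, hid m hm]
    intro h
    have : i = m := by exact_mod_cast h
    omega
  have hcast : ((i : Int) + 1) = ((i + 1 : Nat) : Int) := by push_cast; ring
  have hslice := pvSliceMap V (i + 1) m him (le_of_lt hm)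
  have hflag1 : ((PySem.List.pyRange ((i : Int) + 1) (m : Int) 1).foldl (fun fl s =>
        if ((V[i]).2, (PySem.List.pyGetD V s ((0 : Int), "")).2) ∈ cr then false else fl) true)
      = ((V.drop (i + 1)).take (m - (i + 1))).all (fun e3 => !decide (((V[i]).2, e3.2) ∈ cr)) := by
    rw [pvFlagFold, Bool.true_and, ← hslice, hcast, List.all_map]
    rfl
  have hflag2 : ((PySem.List.pyRange ((i : Int) + 1) (m : Int) 1).foldl (fun fl s =>
        if ((PySem.List.pyGetD V s ((0 : Int), "")).2, (V[m]).2) ∈ cr then false else fl) true)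
      = ((V.drop (i + 1)).take (m - (i + 1))).all (fun e3 => !decide ((e3.2, (V[m]).2) ∈ cr)) := by
    rw [pvFlagFold, Bool.true_and, ← hslice, hcast, List.all_map]
    rfl
  simp only [pvGA, hgi, hgm, hne, if_false, hflag1, hflag2, pvCond]
  split_ifs with h1 h2 h3 <;> simp_all <;> tauto

-- A's inner loop (from index m on) computes pvSpecInner
theorem pvInnerA (cr : List (String × String)) (V : List (Int × String))
    (hid : ∀ (j : Nat) (h : j < V.length), (V[j]).1 = (j : Int)) (i : Nat) (hi : i < V.length) :
    ∀ (t m : Nat), V.length - m = t → i + 1 ≤ m → m ≤ V.length →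
    (PySem.List.pyRange (m : Int) (V.length : Int) 1).flatMap (pvGA cr V (i : Int))
      = pvSpecInner cr V[i] ((V.drop (i + 1)).take (m - (i + 1))) (V.drop m) := by
  intro t
  induction t with
  | zero =>
      intro m ht h1 h2
      have hm : m = V.length := by omega
      subst hm
      rw [PySem.List.pyRange_one_eq_nil (le_refl _)]
      simp [pvSpecInner]
  | succ t ih =>
      intro m ht h1 h2
      have hm : m < V.length := by omega
      rw [PySem.List.pyRange_one_cons (by exact_mod_cast hm), List.flatMap_cons]
      have hdrop : V.drop m = V[m] :: V.drop (m + 1) := List.drop_eq_getElem_cons hm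
      rw [hdrop]
      rw [pvGAeq cr V hid i m hi h1 hm]
      have hc : ((m : Int) + 1) = ((m + 1 : Nat) : Int) := by push_cast; ring
      rw [hc, ih (m + 1) (by omega) (by omega) (by omega)]
      have htake : (V.drop (i + 1)).take ((m + 1) - (i + 1))
          = (V.drop (i + 1)).take (m - (i + 1)) ++ [V[m]] := by
        have h3 : (m + 1) - (i + 1) = (m - (i + 1)) + 1 := by omega
        rw [h3, List.take_add_one]
        have hlt : m - (i + 1) < (V.drop (i + 1)).length := by
          rw [List.length_drop]; omega
        rw [List.getElem?_eq_getElem hlt]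
        congr 2
        rw [List.getElem_drop]
        simp only [show i + 1 + (m - (i + 1)) = m from by omega, Option.toList_some]
      rw [htake]
      rfl

theorem pvOuter (cr : List (String × String)) (V : List (Int × String))
    (hid : ∀ (j : Nat) (h : j < V.length), (V[j]).1 = (j : Int)) :
    ∀ (t m : Nat), V.length - m = t → m ≤ V.length →
    (PySem.List.pyRange (m : Int) (V.length : Int) 1).flatMap
        (fun i => (PySem.List.pyRange i (V.length : Int) 1).flatMap (pvGA cr V i))
      = pvBOuter (PySem.Set.ofList cr) (V.drop m) := by
  intro t
  induction t with
  | zero =>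
      intro m ht h2
      have hm : m = V.length := by omega
      subst hm
      rw [PySem.List.pyRange_one_eq_nil (le_refl _)]
      simp [pvBOuter]
  | succ t ih =>
      intro m ht h2
      have hm : m < V.length := by omega
      have hmi : ((m : Int)) < (V.length : Int) := by exact_mod_cast hm
      rw [PySem.List.pyRange_one_cons hmi, List.flatMap_cons]
      have hdrop : V.drop m = V[m] :: V.drop (m + 1) := List.drop_eq_getElem_cons hm
      rw [hdrop]
      have hGAmm : pvGA cr V (m : Int) (m : Int) = [] := by simp [pvGA]
      have hc : ((m : Int) + 1) = ((m + 1 : Nat) : Int) := by push_cast; ring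
      have hhead : (PySem.List.pyRange (m : Int) (V.length : Int) 1).flatMap (pvGA cr V (m : Int))
          = pvBInner (PySem.Set.ofList cr) V[m] (V.drop (m + 1)) false PySem.Set.empty := by
        rw [PySem.List.pyRange_one_cons hmi, List.flatMap_cons, hGAmm, List.nil_append, hc,
          pvInnerA cr V hid m hm (V.length - (m + 1)) (m + 1) rfl (le_refl _) (by omega)]
        rw [pvInnerB cr V[m] (V.drop (m + 1)) [] false PySem.Set.empty (by simp) (by simp [PySem.Set.empty])]
        congr 1
        simp
      rw [hhead, hc, ih (m + 1) (by omega) (by omega)]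
      rfl

-- ids in the built V are the positions
theorem pvVid (trace : List (List (String × String))) (al : Bool) :
    ∀ (j : Nat) (h : j < ((PySem.List.enumerate trace).map (fun p => (p.1, pvEventLabel al p.2))).length),
      ((((PySem.List.enumerate trace).map (fun p => (p.1, pvEventLabel al p.2)))[j]).1 : Int) = (j : Int) := by
  intro j h
  simp [List.getElem_map, PySem.List.getElem_enumerate]

-- ===== VERDICT (by name: the statement is the Claim_ definition above) =====
theorem ExtractInstanceGraph_spec : Claim_equal_ExtractInstanceGraph := by
  intro trace cr alignment hdom hpre
  obtain ⟨ha, -⟩ := hpre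
  subst ha
  unfold Spec_ExtractInstanceGraph
  dsimp only [ExtractInstanceGraph, ExtractInstanceGraph_alt]
  rw [pvVfold trace (pvEventLabel false) [] 0, List.nil_append]
  set Vl := (PySem.List.enumerate trace).map (fun p => (p.1, pvEventLabel false p.2)) with hVl
  have houter := pvFoldlFlat (PySem.List.pyRange 0 (Vl.length : Int) 1)
      (fun i => (PySem.List.pyRange i (Vl.length : Int) 1).flatMap (pvGA cr Vl i))
      (fun W i => (PySem.List.pyRange i (Vl.length : Int) 1).foldl (fun W k =>
        let e1 := PySem.List.pyGetD Vl i ((0 : Int), "")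
        let e2 := PySem.List.pyGetD Vl k ((0 : Int), "")
        if e1.1 = e2.1 then W
        else if (e1.2, e2.2) ∈ cr then
          let flag_e1 := (PySem.List.pyRange (i + 1) k 1).foldl (fun fl s =>
              let e3 := PySem.List.pyGetD Vl s ((0 : Int), "")
              if (e1.2, e3.2) ∈ cr then false else fl) true
          let flag_e2 := (PySem.List.pyRange (i + 1) k 1).foldl (fun fl s =>
              let e3 := PySem.List.pyGetD Vl s ((0 : Int), "")
              if (e3.2, e2.2) ∈ cr then false else fl) true
          if flag_e1 || flag_e2 then W ++ [(e1, e2)] else W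
        else W) W)
      (fun acc i => pvFoldlFlat _ _ _
        (fun acc k => by simp only [pvGA]; split_ifs <;> simp) acc)
  rw [houter, List.nil_append]
  have hmain := pvOuter cr Vl (pvVid trace false) Vl.length 0 (by omega) (by omega)
  simp only [Nat.cast_zero, List.drop_zero] at hmain
  rw [hmain]
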